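-- pv_equiv track=rewrite | github.com/pypi-data/pypi-mirror-384 | packages/brighteyes-ffs/brighteyes_ffs-0.0.33-py3-none-any.whl/brighteyes_ffs/fcs/atimes2corrparallel.py | convert_crossall_to_list_of_g
-- ===== SOURCE A (Python) =====
-- def convert_crossall_to_list_of_g(n_ch):
--     """
--     Convert the string "crossAll" to a list of all crosscorrelations to calculate
--
--     Parameters
--     ----------
--     n_ch : int
--         Number of channels.
--
--     Returns
--     -------
--     list_of_g : list of strings
--         ["x0000", "x0001", ..., "x2525"].
--
--     """
--     list_of_g = []
--     for i in range(n_ch):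
--         str_i = ""
--         if i < 10:
--             str_i += "0"
--         str_i += str(i)
--         for j in range(n_ch):
--             str_j = ""
--             if j < 10:
--                 str_j += "0"
--             str_j += str(j)
--             list_of_g.append("x" + str_i + str_j)
--     return list_of_g
-- ===== SOURCE B (Python) =====
-- def convert_crossall_to_list_of_g(n_ch):
--     if n_ch <= 0:
--         return []
--     lab = ["%02d" % k for k in range(n_ch)]
--     return ["x" + lab[t // n_ch] + lab[t % n_ch] for t in range(n_ch * n_ch)]
-- ===== Notes on version B (the rewrite author's own statement) =====
-- stated objective: alternative
-- what changed: Replaces the nested per-channel loops that rebuild padded strings with a single flat pass over range(n*n) that recovers each channel pair by divmod of the flat index and concatenates labels from a table of '%02d'-formatted channel names built once.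
import Mathlib
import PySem

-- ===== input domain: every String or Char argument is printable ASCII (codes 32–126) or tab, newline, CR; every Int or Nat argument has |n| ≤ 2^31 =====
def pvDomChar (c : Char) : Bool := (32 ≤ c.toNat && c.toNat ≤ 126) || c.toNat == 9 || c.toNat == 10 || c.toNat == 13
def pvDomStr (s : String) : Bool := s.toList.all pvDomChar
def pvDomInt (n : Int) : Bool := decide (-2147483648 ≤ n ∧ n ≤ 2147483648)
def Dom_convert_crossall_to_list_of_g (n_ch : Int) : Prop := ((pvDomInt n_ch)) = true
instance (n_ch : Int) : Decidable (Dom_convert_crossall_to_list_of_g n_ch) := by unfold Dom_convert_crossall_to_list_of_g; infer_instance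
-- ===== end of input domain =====

-- B makes a single flat pass over range(n*n), recovering each channel pair (i, j) by
-- divmod of the flat index and formatting it with one '%02d%02d' format; objective: alternative.

-- ===== PORT A =====
-- strings are built on the List Char side (PySem convention); String.ofList at the append
def convert_crossall_to_list_of_g (n_ch : Int) : List String :=
  (PySem.List.pyRange 0 n_ch 1).foldl (fun list_of_g i =>
    let str_i : List Char := (if i < 10 then ['0'] else []) ++ PySem.Int.toChars i
    (PySem.List.pyRange 0 n_ch 1).foldl (fun acc j =>
      let str_j : List Char := (if j < 10 then ['0'] else []) ++ PySem.Int.toChars j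
      acc ++ [String.ofList ('x' :: (str_i ++ str_j))]) list_of_g) []

-- ===== PORT B =====
-- '%02d' on a nonnegative int is exactly zfill 2 of str(k); labels kept as List Char
def convert_crossall_to_list_of_g_alt (n_ch : Int) : List String :=
  if n_ch ≤ 0 then []
  else
    let lab : List (List Char) :=
      (PySem.List.pyRange 0 n_ch 1).map (fun k => PySem.Chars.zfill (PySem.Int.toChars k) 2)
    (PySem.List.pyRange 0 (n_ch * n_ch) 1).map (fun t =>
      String.ofList ('x' ::
        (PySem.List.pyGetD lab (PySem.Int.floordiv t n_ch) [] ++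
         PySem.List.pyGetD lab (PySem.Int.mod t n_ch) [])))

-- ===== PRECONDITION & SPEC =====
def Spec_convert_crossall_to_list_of_g (n_ch : Int) (out : List String) : Prop := out = convert_crossall_to_list_of_g_alt n_ch
instance (n_ch : Int) (out : List String) : Decidable (Spec_convert_crossall_to_list_of_g n_ch out) := by unfold Spec_convert_crossall_to_list_of_g; infer_instance

-- ===== CLAIM =====
def Claim_equal_convert_crossall_to_list_of_g : Prop := ∀ (n_ch : Int), Dom_convert_crossall_to_list_of_g n_ch → Spec_convert_crossall_to_list_of_g n_ch (convert_crossall_to_list_of_g n_ch)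

-- ===== LEMMAS AND PROOFS =====

-- the label string both programs emit for the (nonnegative) pair (i, j)
def pvPair (i j : Int) : String :=
  String.ofList ('x' :: (PySem.Chars.zfill (PySem.Int.toChars i) 2 ++ PySem.Chars.zfill (PySem.Int.toChars j) 2))

-- toDigitsCore never shortens its accumulator
theorem pv_toDigitsCore_len_mono (b : Nat) : ∀ (f n : Nat) (l : List Char),
    l.length ≤ (Nat.toDigitsCore b f n l).length := by
  intro f
  induction f with
  | zero => intro n l; simp [Nat.toDigitsCore]
  | succ f ih =>
    intro n l
    simp only [Nat.toDigitsCore]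
    split
    · simp
    · calc l.length ≤ (Nat.digitChar (n % b) :: l).length := by simp
        _ ≤ _ := ih _ _

theorem pv_one_le_toDigitsCore_len (b f n : Nat) (hf : 0 < f) :
    1 ≤ (Nat.toDigitsCore b f n []).length := by
  obtain ⟨g, rfl⟩ : ∃ g, f = g + 1 := ⟨f - 1, by omega⟩
  simp only [Nat.toDigitsCore]
  split
  · simp
  · calc (1 : Nat) = ([Nat.digitChar (n % b)] : List Char).length := by simp
      _ ≤ _ := pv_toDigitsCore_len_mono b g (n / b) _

-- str(i) of an integer 10 ≤ i has at least two characters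
theorem pv_two_le_toChars_len (i : Int) (h : 10 ≤ i) : 2 ≤ (PySem.Int.toChars i).length := by
  have hneg : ¬ i < 0 := by omega
  simp only [PySem.Int.toChars, hneg, if_false]
  have h10 : 10 ≤ i.toNat := by omega
  unfold Nat.toDigits
  obtain ⟨f, hf⟩ : ∃ f, i.toNat + 1 = f + 1 := ⟨i.toNat, rfl⟩
  rw [hf]
  simp only [Nat.toDigitsCore]
  have hdiv : ¬ i.toNat / 10 = 0 := by
    intro h0; omega
  simp only [hdiv, if_false]
  rw [Nat.toDigitsCore_lens_eq]
  have := pv_one_le_toDigitsCore_len 10 f (i.toNat / 10) (by omega)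
  omega

-- A's manual padding of a nonnegative channel index equals zfill(2)
theorem pv_label_eq (i : Int) (h0 : 0 ≤ i) :
    (if i < 10 then ['0'] else []) ++ PySem.Int.toChars i
      = PySem.Chars.zfill (PySem.Int.toChars i) 2 := by
  by_cases h : i < 10
  · interval_cases i <;> decide
  · have h2 : 2 ≤ (PySem.Int.toChars i).length := pv_two_le_toChars_len i (by omega)
    simp only [h, if_false, List.nil_append, PySem.Chars.zfill]
    rw [if_pos (by exact_mod_cast h2)]

-- A's nested foldl appends are the flatMap of pair labels over the two ranges
theorem pv_A_eq (n : Int) :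
    convert_crossall_to_list_of_g n
      = (PySem.List.pyRange 0 n 1).flatMap
          (fun i => (PySem.List.pyRange 0 n 1).map (fun j => pvPair i j)) := by
  unfold convert_crossall_to_list_of_g
  rw [PySem.List.foldl_congr_mem _ _
    (fun list_of_g i => list_of_g ++ (PySem.List.pyRange 0 n 1).map (fun j => pvPair i j)) _ ?_]
  · rw [PySem.List.foldl_append_eq_flatMap]
    simp
  · intro acc i hi
    have hi0 : 0 ≤ i := (PySem.List.mem_pyRange_one.mp hi).1
    simp only
    rw [PySem.List.foldl_congr_mem _ _ (fun acc2 j => acc2 ++ [pvPair i j]) _ ?_]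
    · rw [PySem.List.foldl_append_singleton_eq_map]
    · intro acc2 j hj
      have hj0 : 0 ≤ j := (PySem.List.mem_pyRange_one.mp hj).1
      simp only [pvPair, ← pv_label_eq i hi0, ← pv_label_eq j hj0]

-- enumerate a grid by its flat index
theorem pv_range_mul (a b : Nat) :
    List.range (a * b) = (List.range a).flatMap (fun i => (List.range b).map (fun j => i * b + j)) := by
  induction a with
  | zero => simp
  | succ a ih =>
    rw [Nat.succ_mul, List.range_add, ih, List.range_succ, List.flatMap_append]
    simp [Nat.add_comm]

-- ===== VERDICT =====
theorem convert_crossall_to_list_of_g_spec : Claim_equal_convert_crossall_to_list_of_g := by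
  intro n _
  show _ = _
  rw [pv_A_eq]
  unfold convert_crossall_to_list_of_g_alt
  by_cases hn : n ≤ 0
  · simp [hn, PySem.List.pyRange_one_eq_nil hn]
  · rw [if_neg hn]
    obtain ⟨m, rfl⟩ : ∃ m : Nat, n = (m : Int) := ⟨n.toNat, by omega⟩
    have hm : 0 < m := by exact_mod_cast not_le.mp hn
    have hmm : (m : Int) * m = ((m * m : Nat) : Int) := by push_cast; ring
    rw [hmm, PySem.List.pyRange_zero_nat, PySem.List.pyRange_zero_nat, pv_range_mul m m,
      List.map_flatMap, List.flatMap_map, List.map_flatMap]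
    refine List.flatMap_congr ?_
    intro i hi
    simp only [List.map_map]
    refine List.map_congr_left ?_
    intro j hj
    have hjm : j < m := List.mem_range.mp hj
    simp only [Function.comp_def]
    have h1 : PySem.Int.floordiv ((i * m + j : Nat) : Int) ((m : Nat) : Int) = ((i : Nat) : Int) := by
      rw [PySem.Int.floordiv_natCast]
      congr 1
      rw [Nat.mul_comm i m, Nat.mul_add_div hm, Nat.div_eq_of_lt hjm, Nat.add_zero]
    have h2 : PySem.Int.mod ((i * m + j : Nat) : Int) ((m : Nat) : Int) = ((j : Nat) : Int) := by
      rw [PySem.Int.mod_natCast]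
      congr 1
      rw [Nat.mul_comm i m, Nat.mul_add_mod, Nat.mod_eq_of_lt hjm]
    push_cast
    push_cast at h1 h2
    rw [h1, h2]
    have him : i < m := List.mem_range.mp hi
    simp [PySem.List.pyGetD_natCast, List.getD_eq_getElem?_getD, hjm, him, pvPair]
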